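-- pv_equiv track=rewrite | github.com/OpenCovenant/ink | marking/ec_specials.py | generate_ec_permutations
-- ===== SOURCE A (Python) =====
-- def generate_ec_permutations(word):
--     perms = ['']
--
--     if word is None:
--         return perms
--
--     specials_map = {'e': ['e', 'ë'], 'c': ['c', 'ç']}
--     for char in word:
--         if char not in ['e', 'c']:
--             perms = [perm + char for perm in perms]
--         else:
--             some_perms = [perm + specials_map[char][0] for perm in perms]
--             other_perms = [perm + specials_map[char][1] for perm in perms]
--             perms = some_perms + other_perms
--
--     perms.remove(word)
--     return perms
-- ===== SOURCE B (Python) =====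
-- def generate_ec_permutations(word):
--     if word is None:
--         return ['']
--     accent = {'e': 'ë', 'c': 'ç'}
--     k = sum(1 for ch in word if ch in accent)
--     result = []
--     for n in range(1, 2 ** k):
--         chars = []
--         j = 0
--         for ch in word:
--             if ch in accent:
--                 chars.append(accent[ch] if (n >> j) & 1 else ch)
--                 j += 1
--             else:
--                 chars.append(ch)
--         result.append(''.join(chars))
--     return result
-- ===== Notes on version B (the rewrite author's own statement) =====
-- stated objective: alternative
-- what changed: Replaces the doubling list-of-prefixes construction followed by .remove(word) with a single count k of the 'e'/'c' positions and direct bitmask enumeration n = 1 .. 2^k-1, rendering each variant independently (leftmost special = least-significant bit), so the original word (mask 0) is simply never generated.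
import Mathlib
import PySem

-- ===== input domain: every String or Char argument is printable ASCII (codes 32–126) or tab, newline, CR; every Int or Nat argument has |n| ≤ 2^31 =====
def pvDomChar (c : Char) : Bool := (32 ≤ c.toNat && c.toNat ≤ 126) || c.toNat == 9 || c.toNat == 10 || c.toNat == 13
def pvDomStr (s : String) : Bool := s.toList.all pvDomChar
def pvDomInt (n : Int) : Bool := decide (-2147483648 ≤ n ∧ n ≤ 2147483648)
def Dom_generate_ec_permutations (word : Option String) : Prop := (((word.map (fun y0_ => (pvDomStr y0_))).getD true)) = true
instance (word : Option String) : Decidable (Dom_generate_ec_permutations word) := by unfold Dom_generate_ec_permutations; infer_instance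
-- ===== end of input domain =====

-- B replaces A's doubling list-of-prefixes + .remove(word) by counting the 'e'/'c'
-- positions and enumerating bitmasks 1 .. 2^k-1 directly (alternative decomposition,
-- same value; strings are handled on the List Char side, wrapped at the boundary).

-- ===== PORT A =====
-- step of the 'for char in word' loop of A (perms as List Char lists; 'perm + char'
-- is char-list append; specials_map[char][0] = char, specials_map[char][1] = accent)
def pvAStep (perms : List (List Char)) (ch : Char) : List (List Char) :=
  if ¬ (ch = 'e' ∨ ch = 'c') then
    perms.map (fun p => p ++ [ch])
  else
    perms.map (fun p => p ++ [ch]) ++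
      perms.map (fun p => p ++ [if ch = 'e' then 'ë' else 'ç'])

def generate_ec_permutations (word : Option String) : List String :=
  match word with
  | none => [""]
  | some w =>
    let perms := w.toList.foldl pvAStep [([] : List Char)]
    -- perms.remove(word): never raises, since the all-base variant equals word
    ((PySem.List.remove? perms w.toList).getD []).map String.ofList

-- ===== PORT B =====
-- inner 'for ch in word' loop of B: state = (j = specials seen so far, chars built)
def pvBStep (n : Nat) (st : Nat × List Char) (ch : Char) : Nat × List Char :=
  if ch = 'e' || ch = 'c' then
    (st.1 + 1, st.2 ++ [if (n >>> st.1) &&& 1 = 1 then (if ch = 'e' then 'ë' else 'ç') else ch])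
  else
    (st.1, st.2 ++ [ch])

def generate_ec_permutations_alt (word : Option String) : List String :=
  match word with
  | none => [""]
  | some w =>
    let cs := w.toList
    let k := (cs.filter (fun c => c = 'e' || c = 'c')).length
    -- range(1, 2 ** k) = drop 1 of range(0, 2 ** k)
    ((List.range (2 ^ k)).drop 1).map (fun n => String.ofList (cs.foldl (pvBStep n) (0, [])).2)

-- ===== PRECONDITION & SPEC =====
def Spec_generate_ec_permutations (word : Option String) (out : List String) : Prop := out = generate_ec_permutations_alt word
instance (word : Option String) (out : List String) : Decidable (Spec_generate_ec_permutations word out) := by unfold Spec_generate_ec_permutations; infer_instance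

-- ===== CLAIM (what is proved, stated in full; the proofs are below) =====
def Claim_equal_generate_ec_permutations : Prop := ∀ (word : Option String), Dom_generate_ec_permutations word → Spec_generate_ec_permutations word (generate_ec_permutations word)

-- ===== LEMMAS AND PROOFS =====

-- reference builder: the variant of cs selected by mask n, leftmost special = LSB
def pvBld : List Char → Nat → List Char
  | [], _ => []
  | c :: cs, n =>
    if c = 'e' ∨ c = 'c' then
      (if n % 2 = 1 then (if c = 'e' then 'ë' else 'ç') else c) :: pvBld cs (n / 2)
    else c :: pvBld cs n

def pvK (cs : List Char) : Nat := (cs.filter (fun c => c = 'e' || c = 'c')).length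

lemma pvBld_zero (cs : List Char) : pvBld cs 0 = cs := by
  induction cs with
  | nil => rfl
  | cons c cs ih => by_cases h : c = 'e' ∨ c = 'c' <;> simp [pvBld, h, ih]

lemma pvPairSplit {α : Type} (M : Nat) (f : Nat → List α) :
    (List.range (2 * M)).flatMap f
      = (List.range M).flatMap (fun m => f (2 * m) ++ f (2 * m + 1)) := by
  induction M with
  | zero => rfl
  | succ M ih =>
    have h2 : 2 * (M + 1) = (2 * M + 1) + 1 := by omega
    rw [h2, List.range_succ, List.range_succ, List.range_succ]
    simp [List.flatMap_append, ih, List.append_assoc]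

lemma pvAStep_fold (cs : List Char) (ps : List (List Char)) :
    cs.foldl pvAStep ps
      = (List.range (2 ^ pvK cs)).flatMap (fun n => ps.map (fun p => p ++ pvBld cs n)) := by
  induction cs generalizing ps with
  | nil => simp [pvK, pvBld]
  | cons c cs ih =>
    rw [List.foldl_cons, ih]
    by_cases h : c = 'e' ∨ c = 'c'
    · have hk : 2 ^ pvK (c :: cs) = 2 * 2 ^ pvK cs := by
        simp [pvK, h]
        by_cases h1 : c = 'e' <;> simp_all [pow_succ] <;> ring
      rw [hk, pvPairSplit]
      refine List.flatMap_congr (fun m _ => ?_)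
      have hb0 : pvBld (c :: cs) (2 * m) = c :: pvBld cs m := by
        simp [pvBld, h, Nat.mul_mod_right]
      have hb1 : pvBld (c :: cs) (2 * m + 1) =
          (if c = 'e' then 'ë' else 'ç') :: pvBld cs m := by
        have hm : (2 * m + 1) / 2 = m := by omega
        have hm2 : (2 * m + 1) % 2 = 1 := by omega
        simp [pvBld, h, hm, hm2]
      simp [pvAStep, h, hb0, hb1, List.map_map, Function.comp_def, List.append_assoc]
    · have hk : pvK (c :: cs) = pvK cs := by
        simp only [pvK, List.filter_cons]
        rw [if_neg (by simpa using h)]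
      rw [hk]
      refine List.flatMap_congr (fun m _ => ?_)
      have hb : pvBld (c :: cs) m = c :: pvBld cs m := by simp [pvBld, h]
      simp [pvAStep, h, hb, List.map_map, Function.comp_def, List.append_assoc]

lemma pvBStep_fold (n : Nat) (cs : List Char) (j : Nat) (acc : List Char) :
    cs.foldl (pvBStep n) (j, acc) = (j + pvK cs, acc ++ pvBld cs (n >>> j)) := by
  induction cs generalizing j acc with
  | nil => simp [pvK, pvBld]
  | cons c cs ih =>
    by_cases h : c = 'e' ∨ c = 'c'
    · have hb : (c = 'e' || c = 'c') = true := by simp [h]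
      have hstep : pvBStep n (j, acc) c =
          (j + 1, acc ++ [if (n >>> j) &&& 1 = 1 then (if c = 'e' then 'ë' else 'ç') else c]) := by
        simp [pvBStep, hb]
      rw [List.foldl_cons, hstep, ih]
      have hk : pvK (c :: cs) = pvK cs + 1 := by simp [pvK, hb]
      have hshift : n >>> (j + 1) = (n >>> j) / 2 := Nat.shiftRight_succ n j
      have hand : (n >>> j) &&& 1 = (n >>> j) % 2 := Nat.and_one_is_mod _
      have hbld : pvBld (c :: cs) (n >>> j) =
          (if (n >>> j) % 2 = 1 then (if c = 'e' then 'ë' else 'ç') else c) :: pvBld cs ((n >>> j) / 2) := by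
        simp [pvBld, h]
      rw [hk, hshift, hbld, hand]
      simp [List.append_assoc]
      omega
    · have hb : (c = 'e' || c = 'c') = false := by
        simp only [Bool.or_eq_false_iff, decide_eq_false_iff_not]
        exact ⟨fun hc => h (Or.inl hc), fun hc => h (Or.inr hc)⟩
      have hstep : pvBStep n (j, acc) c = (j, acc ++ [c]) := by simp [pvBStep, hb]
      rw [List.foldl_cons, hstep, ih]
      have hk : pvK (c :: cs) = pvK cs := by simp [pvK, hb]
      have hbld : pvBld (c :: cs) (n >>> j) = c :: pvBld cs (n >>> j) := by simp [pvBld, h]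
      rw [hk, hbld]
      simp [List.append_assoc]

lemma pvA_perms (cs : List Char) :
    cs.foldl pvAStep [([] : List Char)]
      = (List.range (2 ^ pvK cs)).map (pvBld cs) := by
  rw [pvAStep_fold]
  simp only [List.map_singleton, List.nil_append]
  exact List.map_eq_flatMap.symm

-- ===== VERDICT (by name: the statement is the Claim_ definition above) =====
theorem generate_ec_permutations_spec : Claim_equal_generate_ec_permutations := by
  intro word _
  unfold Spec_generate_ec_permutations generate_ec_permutations generate_ec_permutations_alt
  match word with
  | none => rfl
  | some w =>
    simp only
    rw [pvA_perms]
    have hpos : 0 < 2 ^ pvK w.toList := by positivity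
    obtain ⟨m, hm⟩ : ∃ m, 2 ^ pvK w.toList = m + 1 := ⟨2 ^ pvK w.toList - 1, by omega⟩
    rw [hm, List.range_succ_eq_map]
    simp only [List.map_cons, pvBld_zero, PySem.List.remove?_cons_self, Option.getD_some]
    have hk : (w.toList.filter (fun c => c = 'e' || c = 'c')).length = pvK w.toList := rfl
    rw [hk, hm]
    simp only [List.range_succ_eq_map, List.drop_succ_cons, List.drop_zero, List.map_map]
    refine List.map_congr_left ?_
    intro n _
    simp only [Function.comp]
    rw [pvBStep_fold]
    simp
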